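-- pv_equiv track=rewrite | github.com/myxu95/PRISM_PMF | forcefield/openff.py | _modify_resname_to_lig
-- ===== SOURCE A (Python) =====
-- def _modify_resname_to_lig(itp_content):
--     """Modify residue names to LIG - FIXED VERSION"""
--     lines = itp_content.split("\n")
--     modified_lines = []
--     current_section = None
--
--     for line in lines:
--         stripped = line.strip()
--
--         # Detect section changes
--         if stripped.startswith("[") and stripped.endswith("]"):
--             current_section = stripped[1:-1].strip()
--             modified_lines.append(line)
--             continue
--
--         # Skip comments and empty lines
--         if not stripped or stripped.startswith(";"):
--             modified_lines.append(line)
--             continue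
--
--         # Handle different sections
--         if current_section == "moleculetype":
--             # Replace molecule name with LIG
--             parts = line.split()
--             if len(parts) >= 1:
--                 # Keep the original formatting but replace the first part with LIG
--                 remaining_parts = ' '.join(parts[1:]) if len(parts) > 1 else ""
--                 line = f"LIG              {remaining_parts}".rstrip()
--             modified_lines.append(line)
--
--         elif current_section == "atoms":
--             # Replace resname with LIG in atoms section
--             parts = line.split()
--             if len(parts) >= 8:
--                 # Format: index, atom_type, resnum, resname, name, cgnr, charge, mass
--                 parts[3] = "LIG"  # resname is the 4th field
--                 # Reconstruct line with proper formatting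
--                 line = f"{parts[0]:>6} {parts[1]:<15} {parts[2]:>4} {parts[3]:<7} {parts[4]:<10} {parts[5]:>4} {parts[6]:>17} {parts[7]:>17}"
--             modified_lines.append(line)
--
--         else:
--             # For all other sections (bonds, angles, dihedrals, etc.), keep the line as is
--             # This is crucial - no modifications should be made to other sections
--             modified_lines.append(line)
--
--     return "\n".join(modified_lines)
-- ===== SOURCE B (Python) =====
-- def _modify_resname_to_lig(itp_content):
--     """Two-phase rewrite: first tag every line with its section, then map a
--     section-aware transformer over the tagged lines."""
--     lines = itp_content.split("\n")
--
--     # phase 1: tag each line (is_header, current_section)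
--     tags = []
--     current = None
--     for line in lines:
--         s = line.strip()
--         if s.startswith("[") and s.endswith("]"):
--             current = s[1:-1].strip()
--             tags.append((True, current))
--         else:
--             tags.append((False, current))
--
--     # phase 2: transform each line according to its tag
--     def transform(is_header, section, line):
--         if is_header:
--             return line
--         s = line.strip()
--         if not s or s.startswith(";"):
--             return line
--         if section == "moleculetype":
--             parts = line.split()
--             if parts:
--                 return ("LIG              " + " ".join(parts[1:])).rstrip()
--             return line
--         if section == "atoms":
--             p = line.split()
--             if len(p) >= 8:
--                 return " ".join([p[0].rjust(6), p[1].ljust(15), p[2].rjust(4),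
--                                  "LIG".ljust(7), p[4].ljust(10), p[5].rjust(4),
--                                  p[6].rjust(17), p[7].rjust(17)])
--             return line
--         return line
--
--     return "\n".join(transform(h, sec, ln) for (h, sec), ln in zip(tags, lines))
-- ===== Notes on version B (the rewrite author's own statement) =====
-- stated objective: alternative
-- what changed: B replaces A's single stateful loop by a two-phase pipeline: a first scan tags every line with (is_header, section), then a stateless per-line transformer is mapped over the tagged lines (rjust/ljust joins instead of format strings) and joined.
import Mathlib
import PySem

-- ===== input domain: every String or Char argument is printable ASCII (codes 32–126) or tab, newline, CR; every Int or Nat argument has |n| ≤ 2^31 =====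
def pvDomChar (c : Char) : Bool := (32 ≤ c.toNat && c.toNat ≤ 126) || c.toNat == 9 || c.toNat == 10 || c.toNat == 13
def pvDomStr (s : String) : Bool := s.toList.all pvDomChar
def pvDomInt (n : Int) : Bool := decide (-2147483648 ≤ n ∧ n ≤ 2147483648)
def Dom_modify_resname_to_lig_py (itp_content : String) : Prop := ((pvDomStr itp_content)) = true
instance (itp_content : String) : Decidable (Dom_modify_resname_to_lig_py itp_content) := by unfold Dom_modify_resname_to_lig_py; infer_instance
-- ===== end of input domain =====

-- B rewrites A's one stateful loop as a two-phase pipeline (tag lines with their section, then map a stateless transformer); same values, no speed claim.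

-- shared low-level helpers (Python string formatting, exact for :>w / :<w i.e. rjust/ljust with spaces)
def pvRJ (s : String) (w : Nat) : String := String.ofList (List.replicate (w - s.toList.length) ' ' ++ s.toList)
def pvLJ (s : String) (w : Nat) : String := String.ofList (s.toList ++ List.replicate (w - s.toList.length) ' ')
-- stripped[1:-1].strip()
def pvSecName (stripped : String) : String := PySem.Str.strip (PySem.Str.slice stripped (some 1) (some (-1)))
def pvIsHeader (s : String) : Bool := PySem.Str.startswith s "[" && PySem.Str.endswith s "]"
def pvIsSkip (s : String) : Bool := s == "" || PySem.Str.startswith s ";"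
-- the eight fixed-width fields joined by single spaces (A's f-string = B's rjust/ljust join)
def pvAtomsFmt (parts : List String) : String :=
  PySem.Str.join " " [pvRJ (parts.getD 0 "") 6, pvLJ (parts.getD 1 "") 15,
    pvRJ (parts.getD 2 "") 4, pvLJ "LIG" 7, pvLJ (parts.getD 4 "") 10,
    pvRJ (parts.getD 5 "") 4, pvRJ (parts.getD 6 "") 17, pvRJ (parts.getD 7 "") 17]

-- ===== PORT A =====
-- one iteration of A's for-loop body: (new current_section, emitted line)
def pvStepA (cur : Option String) (line : String) : Option String × String :=
  let stripped := PySem.Str.strip line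
  if pvIsHeader stripped then (some (pvSecName stripped), line)
  else if pvIsSkip stripped then (cur, line)
  else if cur == some "moleculetype" then
    let parts := PySem.Str.split₀ line
    if parts.length ≥ 1 then
      let remaining := if parts.length > 1 then PySem.Str.join " " (parts.drop 1) else ""
      (cur, PySem.Str.rstrip (String.ofList ("LIG              ".toList ++ remaining.toList)))
    else (cur, line)
  else if cur == some "atoms" then
    let parts := PySem.Str.split₀ line
    if parts.length ≥ 8 then (cur, pvAtomsFmt parts) else (cur, line)
  else (cur, line)

def pvLoopA (cur : Option String) : List String → List String
  | [] => []
  | line :: rest =>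
      let s := pvStepA cur line
      s.2 :: pvLoopA s.1 rest

def modify_resname_to_lig_py (itp_content : String) : String :=
  PySem.Str.join "\n" (pvLoopA none ((PySem.Str.split? itp_content "\n").getD []))

-- ===== PORT B =====
-- phase 1: tag each line with (is_header, section in force)
def pvSecScan (cur : Option String) : List String → List (Bool × Option String)
  | [] => []
  | line :: rest =>
      let stripped := PySem.Str.strip line
      if pvIsHeader stripped then
        let sec := pvSecName stripped
        (true, some sec) :: pvSecScan (some sec) rest
      else (false, cur) :: pvSecScan cur rest

-- phase 2: stateless per-line transformer
def pvTransform (tag : Bool) (sec : Option String) (line : String) : String :=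
  if tag then line
  else
    let stripped := PySem.Str.strip line
    if pvIsSkip stripped then line
    else if sec == some "moleculetype" then
      let parts := PySem.Str.split₀ line
      if parts.isEmpty then line
      else PySem.Str.rstrip (String.ofList ("LIG              ".toList ++ (PySem.Str.join " " (parts.drop 1)).toList))
    else if sec == some "atoms" then
      let parts := PySem.Str.split₀ line
      if parts.length ≥ 8 then pvAtomsFmt parts else line
    else line

def modify_resname_to_lig_py_alt (itp_content : String) : String :=
  let lines := (PySem.Str.split? itp_content "\n").getD []
  PySem.Str.join "\n" (List.zipWith (fun ts l => pvTransform ts.1 ts.2 l) (pvSecScan none lines) lines)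

-- ===== PRECONDITION & SPEC =====
def Spec_modify_resname_to_lig_py (itp_content : String) (out : String) : Prop := out = modify_resname_to_lig_py_alt itp_content
instance (itp_content : String) (out : String) : Decidable (Spec_modify_resname_to_lig_py itp_content out) := by unfold Spec_modify_resname_to_lig_py; infer_instance

-- ===== CLAIM (what is proved, stated in full; the proofs are below) =====
def Claim_equal_modify_resname_to_lig_py : Prop := ∀ (itp_content : String), Dom_modify_resname_to_lig_py itp_content → Spec_modify_resname_to_lig_py itp_content (modify_resname_to_lig_py itp_content)

-- ===== LEMMAS AND PROOFS =====

-- the two per-line results coincide, given the same section state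
theorem pvStep_eq_transform (cur : Option String) (line : String)
    (h : ¬ pvIsHeader (PySem.Str.strip line) = true) :
    (pvStepA cur line).2 = pvTransform false cur line := by
  unfold pvStepA pvTransform
  simp only [if_neg h, Bool.false_eq_true, if_false]
  by_cases hs : pvIsSkip (PySem.Str.strip line) = true
  · simp [hs]
  · simp only [if_neg hs]
    by_cases hm : cur == some "moleculetype"
    · simp only [if_pos hm]
      rcases hp : PySem.Str.split₀ line with _ | ⟨p, ps⟩
      · simp
      · rcases ps with _ | ⟨q, qs⟩ <;> simp [PySem.Str.join]
    · simp only [if_neg hm]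
      by_cases ha : cur == some "atoms"
      · simp only [if_pos ha]
        split <;> rfl
      · simp [ha]

theorem pvLoopA_eq_scan (lines : List String) : ∀ (cur : Option String),
    pvLoopA cur lines
      = List.zipWith (fun ts l => pvTransform ts.1 ts.2 l) (pvSecScan cur lines) lines := by
  induction lines with
  | nil => intro cur; rfl
  | cons line rest ih =>
      intro cur
      by_cases h : pvIsHeader (PySem.Str.strip line) = true
      · simp only [pvLoopA, pvSecScan, pvStepA, h, if_pos, List.zipWith]
        exact congrArg _ (ih _)
      · simp only [pvLoopA, pvSecScan, if_neg h, List.zipWith]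
        refine congrArg₂ _ (pvStep_eq_transform cur line h) ?_
        have hfst : (pvStepA cur line).1 = cur := by
          unfold pvStepA
          simp only [if_neg h]
          by_cases hs : pvIsSkip (PySem.Str.strip line) = true
          · simp [hs]
          · simp only [if_neg hs]
            by_cases hm : cur == some "moleculetype"
            · simp only [if_pos hm]
              rcases PySem.Str.split₀ line with _ | ⟨p, ps⟩ <;> simp
            · simp only [if_neg hm]
              by_cases ha : cur == some "atoms"
              · simp only [if_pos ha]
                split <;> rfl
              · simp [ha]
        rw [hfst]; exact ih cur

-- ===== VERDICT (by name: the statement is the Claim_ definition above) =====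
theorem modify_resname_to_lig_py_spec : Claim_equal_modify_resname_to_lig_py := by
  intro itp _
  unfold Spec_modify_resname_to_lig_py modify_resname_to_lig_py modify_resname_to_lig_py_alt
  rw [pvLoopA_eq_scan]
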